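-- pv_equiv track=rewrite | github.com/laippmiles/niuKeCode | 华为机试题集/45_名字的漂亮度.py | func
-- ===== SOURCE A (Python) =====
-- def func(s):
--     dicn = {}
--     for i in s :
--         if i not in dicn:
--             dicn[i] = 1
--         else:
--             dicn[i] += 1
--     dicn = sorted(dicn.items(),key = lambda x : x[1],reverse = True)
--     count = 0
--     val = 26
--     for j in dicn:
--         count += j[1]*val
--         val -= 1
--     return count
-- ===== SOURCE B (Python) =====
-- def func(s):
--     tally = {}
--     for ch in s:
--         tally[ch] = tally.get(ch, 0) + 1
--     hist = {}
--     maxf = 0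
--     for f in tally.values():
--         hist[f] = hist.get(f, 0) + 1
--         if f > maxf:
--             maxf = f
--     total = 0
--     val = 26
--     f = maxf
--     while f > 0:
--         c = hist.get(f, 0)
--         total += f * (c * val - c * (c - 1) // 2)
--         val -= c
--         f -= 1
--     return total
-- ===== Notes on version B (the rewrite author's own statement) =====
-- stated objective: alternative
-- what changed: Replaces A's comparison sort of (char,freq) items plus a per-item decreasing-weight loop by a counting-sort scheme: a histogram of frequency values consumed in one descending while-loop, each bucket's weighted contribution computed in closed form by a Gauss arithmetic-series formula, so no sort is performed at all.
import Mathlib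
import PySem

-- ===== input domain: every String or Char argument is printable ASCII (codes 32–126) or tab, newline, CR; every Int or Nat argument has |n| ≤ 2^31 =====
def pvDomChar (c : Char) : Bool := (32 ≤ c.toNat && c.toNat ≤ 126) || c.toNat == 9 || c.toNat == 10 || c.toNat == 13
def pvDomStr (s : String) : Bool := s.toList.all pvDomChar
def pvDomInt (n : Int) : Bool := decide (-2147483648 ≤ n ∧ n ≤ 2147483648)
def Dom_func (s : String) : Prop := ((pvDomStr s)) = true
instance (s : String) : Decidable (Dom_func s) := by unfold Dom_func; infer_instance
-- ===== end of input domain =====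

-- B replaces A's comparison sort of the (char, freq) items plus per-item weight loop by a
-- frequency histogram consumed in one descending while-loop, each bucket's contribution
-- computed in closed form (Gauss arithmetic series); no sort is performed (alternative, not faster).

-- ===== PORT A =====
def func (s : String) : Int :=
  let dicn := s.toList.foldl
    (fun (d : PySem.Dict Char Int) i =>
      if d.contains i = false then d.insert i 1
      else d.insert i (((d.get? i).getD 0) + 1)) PySem.Dict.empty
  let dicn' := PySem.List.sorted dicn.items (fun x => x.2) true
  let r := dicn'.foldl (fun (p : Int × Int) j => (p.1 + j.2 * p.2, p.2 - 1)) ((0 : Int), (26 : Int))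
  r.1

-- ===== PORT B =====
-- the 'while f > 0' loop of Source B, recursing on f (fuel = f.toNat; f = n+1 at each step)
def bloop (hist : PySem.Dict Int Int) : Nat → Int → Int → Int
  | 0, total, _ => total
  | n+1, total, val =>
      let f : Int := (n : Int) + 1
      let c := hist.getD f 0
      bloop hist n (total + f * (c * val - PySem.Int.floordiv (c * (c - 1)) 2)) (val - c)

def func_alt (s : String) : Int :=
  let tally := s.toList.foldl
    (fun (d : PySem.Dict Char Int) ch => d.insert ch (d.getD ch 0 + 1)) PySem.Dict.empty
  let hm := tally.values.foldl
    (fun (p : PySem.Dict Int Int × Int) f =>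
      (p.1.insert f (p.1.getD f 0 + 1), if f > p.2 then f else p.2))
    (PySem.Dict.empty, (0 : Int))
  bloop hm.1 hm.2.toNat 0 26

-- ===== PRECONDITION & SPEC =====
def Spec_func (s : String) (out : Int) : Prop := out = func_alt s
instance (s : String) (out : Int) : Decidable (Spec_func s out) := by unfold Spec_func; infer_instance

-- ===== CLAIM (what is proved, stated in full; the proofs are below) =====
def Claim_equal_func : Prop := ∀ (s : String), Dom_func s → Spec_func s (func s)

-- ===== LEMMAS AND PROOFS =====

-- weighted sum with decreasing weights, the common value of A's final loop and B's buckets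
def wsum : List Int → Int → Int
  | [], _ => 0
  | x :: t, v => x * v + wsum t (v - 1)

-- descending run list: replicate (count (m)) m ++ … ++ replicate (count 1) 1
def descRuns (F : List Int) : Nat → List Int
  | 0 => []
  | m+1 => List.replicate (F.count ((m : Int) + 1)) ((m : Int) + 1) ++ descRuns F m

theorem foldl_wsum {α : Type} (L : List (α × Int)) (c v : Int) :
    (L.foldl (fun (p : Int × Int) j => (p.1 + j.2 * p.2, p.2 - 1)) (c, v)).1
      = c + wsum (L.map (·.2)) v := by
  induction L generalizing c v with
  | nil => simp [wsum]
  | cons x t ih => simp [List.foldl_cons, ih, wsum]; ring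

theorem wsum_append (xs ys : List Int) (v : Int) :
    wsum (xs ++ ys) v = wsum xs v + wsum ys (v - xs.length) := by
  induction xs generalizing v with
  | nil => simp [wsum]
  | cons x t ih =>
    simp only [List.cons_append, wsum, ih, List.length_cons]
    have : v - 1 - (t.length : Int) = v - ((t.length : Int) + 1) := by ring
    rw [this]; push_cast; ring

theorem gauss (c : Nat) (f v : Int) :
    wsum (List.replicate c f) v
      = f * ((c : Int) * v - PySem.Int.floordiv ((c : Int) * ((c : Int) - 1)) 2) := by
  induction c generalizing v with
  | zero => simp [wsum]
  | succ n ih =>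
    rw [List.replicate_succ]
    simp only [wsum, ih]
    rw [PySem.Int.floordiv_eq_ediv_of_pos (show (0:Int) < 2 by norm_num),
        PySem.Int.floordiv_eq_ediv_of_pos (show (0:Int) < 2 by norm_num)]
    have hp : (2 : Int) ∣ (n : Int) * ((n : Int) - 1) := by
      have h := Int.even_mul_succ_self ((n : Int) - 1)
      have heq : ((n : Int) - 1) * (((n : Int) - 1) + 1) = (n : Int) * ((n : Int) - 1) := by ring
      exact (heq ▸ h).two_dvd
    have hkey : ((n : Int) + 1) * (((n : Int) + 1) - 1)
        = (n : Int) * ((n : Int) - 1) + 2 * (n : Int) := by ring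
    push_cast
    rw [hkey]
    have hdiv : ((n : Int) * ((n : Int) - 1) + 2 * (n : Int)) / 2
        = (n : Int) * ((n : Int) - 1) / 2 + (n : Int) := by omega
    rw [hdiv]; ring

theorem bloop_eq (hist : PySem.Dict Int Int) (F : List Int)
    (h : ∀ f, hist.getD f 0 = (F.count f : Int)) :
    ∀ (m : Nat) (total val : Int),
      bloop hist m total val = total + wsum (descRuns F m) val := by
  intro m
  induction m with
  | zero => intro total val; simp [bloop, descRuns, wsum]
  | succ n ih =>
    intro total val
    simp only [bloop, ih, descRuns, wsum_append, List.length_replicate, h,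
      gauss (F.count ((n : Int) + 1)) ((n : Int) + 1) val]
    ring

-- bounds of the running-max fold (Source B's maxf)
theorem init_le_foldmax (F : List Int) (a : Int) :
    a ≤ F.foldl (fun m f => if f > m then f else m) a := by
  induction F generalizing a with
  | nil => simp
  | cons y t ih =>
    refine le_trans ?_ (ih (if y > a then y else a))
    split <;> omega

theorem mem_le_foldmax (F : List Int) :
    ∀ (a x : Int), x ∈ F → x ≤ F.foldl (fun m f => if f > m then f else m) a := by
  induction F with
  | nil => intro a x hx; cases hx
  | cons y t ih =>
    intro a x hx
    rcases List.mem_cons.1 hx with rfl | hx'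
    · refine le_trans ?_ (init_le_foldmax t (if x > a then x else a))
      split <;> omega
    · exact ih _ x hx'

theorem foldl_pair_split (F : List Int) (d : PySem.Dict Int Int) (m : Int) :
    F.foldl (fun (p : PySem.Dict Int Int × Int) f =>
        (p.1.insert f (p.1.getD f 0 + 1), if f > p.2 then f else p.2)) (d, m)
      = (F.foldl (fun d f => d.insert f (d.getD f 0 + 1)) d,
         F.foldl (fun m f => if f > m then f else m) m) := by
  induction F generalizing d m with
  | nil => rfl
  | cons y t ih => simp only [List.foldl_cons, ih]

theorem descRuns_count (F : List Int) (m : Nat) (v : Int) :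
    (descRuns F m).count v = if 1 ≤ v ∧ v ≤ (m : Int) then F.count v else 0 := by
  induction m with
  | zero =>
    simp only [descRuns, List.count_nil]
    rw [if_neg]; omega
  | succ n ih =>
    simp only [descRuns, List.count_append, ih, List.count_replicate]
    push_cast
    by_cases hv : v = (n : Int) + 1
    · subst hv
      rw [if_pos (by simp), if_neg (by omega), if_pos (by constructor <;> omega)]
      simp
    · rw [if_neg (by simp only [beq_iff_eq]; omega), zero_add]
      by_cases h1 : 1 ≤ v ∧ v ≤ (n : Int)
      · rw [if_pos h1, if_pos (by omega)]
      · rw [if_neg h1, if_neg (by omega)]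

theorem descRuns_perm (F : List Int) (m : Nat)
    (hb : ∀ f ∈ F, 1 ≤ f ∧ f ≤ (m : Int)) : (descRuns F m).Perm F := by
  rw [List.perm_iff_count]
  intro v
  rw [descRuns_count]
  by_cases h : 1 ≤ v ∧ v ≤ (m : Int)
  · rw [if_pos h]
  · rw [if_neg h, eq_comm, List.count_eq_zero]
    intro hv; exact h (hb v hv)

theorem descRuns_mem_bound (F : List Int) (m : Nat) :
    ∀ x ∈ descRuns F m, 1 ≤ x ∧ x ≤ (m : Int) := by
  induction m with
  | zero => simp [descRuns]
  | succ n ih =>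
    intro x hx
    rcases List.mem_append.1 hx with h | h
    · have := List.eq_of_mem_replicate h
      subst this; push_cast; omega
    · have := ih x h; push_cast; omega

theorem descRuns_pairwise (F : List Int) (m : Nat) :
    (descRuns F m).Pairwise (fun a b => b ≤ a) := by
  induction m with
  | zero => simp [descRuns]
  | succ n ih =>
    rw [descRuns, List.pairwise_append]
    refine ⟨List.pairwise_replicate_of_refl, ih, ?_⟩
    · intro a ha b hb
      have ha' := List.eq_of_mem_replicate ha
      have hb' := descRuns_mem_bound F n b hb
      omega

theorem sorted_eq_descRuns (F : List Int) (m : Nat)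
    (hb : ∀ f ∈ F, 1 ≤ f ∧ f ≤ (m : Int)) :
    PySem.List.sorted F (fun x => x) true = descRuns F m := by
  have h1 : PySem.List.sorted F (fun x => x) false
      = (PySem.List.sorted F (fun x => x) true).reverse := by
    apply PySem.List.sorted_id_eq_of_perm_of_pairwise
    · exact (List.reverse_perm _).trans (PySem.List.sorted_perm F _ true)
    · exact List.pairwise_reverse.2 (PySem.List.sorted_pairwise_rev F _)
  have h2 : PySem.List.sorted F (fun x => x) false = (descRuns F m).reverse := by
    apply PySem.List.sorted_id_eq_of_perm_of_pairwise
    · exact (List.reverse_perm _).trans (descRuns_perm F m hb)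
    · exact List.pairwise_reverse.2 (descRuns_pairwise F m)
  exact List.reverse_injective (h1.symm.trans h2)

-- projecting values out of the value-sorted pair list = reverse-sorting the values
theorem map_snd_sorted_rev (items : List (Char × Int)) :
    (PySem.List.sorted items (fun x => x.2) true).map (·.2)
      = PySem.List.sorted (items.map (·.2)) (fun x => x) true := by
  have hperm : ((PySem.List.sorted items (fun x => x.2) true).map (·.2)).Perm
      (PySem.List.sorted (items.map (·.2)) (fun x => x) true) :=
    ((PySem.List.sorted_perm items (fun x => x.2) true).map _).trans
      (PySem.List.sorted_perm _ _ _).symm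
  have hL : ((PySem.List.sorted items (fun x => x.2) true).map (·.2)).Pairwise
      (fun a b => b ≤ a) :=
    (PySem.List.sorted_pairwise_rev items (fun x => x.2)).map _ (fun _ _ h => h)
  have hR : (PySem.List.sorted (items.map (·.2)) (fun x => x) true).Pairwise
      (fun a b => b ≤ a) :=
    PySem.List.sorted_pairwise_rev _ _
  have hrev : ((PySem.List.sorted items (fun x => x.2) true).map (·.2)).reverse
      = (PySem.List.sorted (items.map (·.2)) (fun x => x) true).reverse := by
    apply PySem.List.eq_of_perm_of_pairwise_le_of_injective (fun x : Int => x)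
      (fun _ _ h => h)
    · exact (List.reverse_perm _).trans (hperm.trans (List.reverse_perm _).symm)
    · exact (List.pairwise_reverse).2 (hL.imp (fun h => h))
    · exact (List.pairwise_reverse).2 (hR.imp (fun h => h))
  exact List.reverse_injective hrev

-- the values of a counter are the positive counts of the distinct elements
theorem counter_values_pos (cs : List Char) :
    ∀ f ∈ (PySem.Dict.counter cs).values, 1 ≤ f := by
  intro f hf
  simp only [PySem.Dict.values, PySem.Dict.items_counter, List.map_map, List.mem_map,
    Function.comp_apply] at hf
  obtain ⟨k, hk, rfl⟩ := hf
  have hmem : k ∈ cs := (PySem.Set.mem_ofList cs k).1 hk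
  have := List.count_pos_iff.2 hmem
  exact_mod_cast this

-- ===== VERDICT (by name: the statement is the Claim_ definition above) =====
theorem func_spec : Claim_equal_func := by
  intro s _
  show func s = func_alt s
  -- A's tally step is the insert-getD counter step
  have hstep : (fun (d : PySem.Dict Char Int) i =>
      if d.contains i = false then d.insert i 1
      else d.insert i (((d.get? i).getD 0) + 1))
      = (fun (d : PySem.Dict Char Int) x => d.insert x (d.getD x 0 + 1)) := by
    funext d x
    by_cases h : d.contains x = false
    · simp [h, PySem.Dict.getD_of_not_contains d 0 h]
    · simp [h, PySem.Dict.getD_eq_get?_getD]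
  -- the common frequency list
  set F := (PySem.Dict.counter s.toList).values with hF
  -- A's value
  have hA : func s = wsum (PySem.List.sorted F (fun x => x) true) 26 := by
    show (let dicn := s.toList.foldl
            (fun (d : PySem.Dict Char Int) i =>
              if d.contains i = false then d.insert i 1
              else d.insert i (((d.get? i).getD 0) + 1)) PySem.Dict.empty
          let dicn' := PySem.List.sorted dicn.items (fun x => x.2) true
          let r := dicn'.foldl (fun (p : Int × Int) j => (p.1 + j.2 * p.2, p.2 - 1))
            ((0 : Int), (26 : Int))
          r.1) = _
    simp only []
    rw [hstep, PySem.Dict.foldl_insert_getD_add_one_eq_counter, foldl_wsum,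
        map_snd_sorted_rev]
    simp only [hF, PySem.Dict.values, zero_add]
  -- bounds for F
  set M := F.foldl (fun m f => if f > m then f else m) 0 with hM
  have hM0 : 0 ≤ M := init_le_foldmax F 0
  have hMN : ((M.toNat : Nat) : Int) = M := Int.toNat_of_nonneg hM0
  have hb : ∀ f ∈ F, 1 ≤ f ∧ f ≤ ((M.toNat : Nat) : Int) := by
    intro f hf
    rw [hMN]
    exact ⟨counter_values_pos s.toList f hf, mem_le_foldmax F 0 f hf⟩
  -- B's value
  have hB : func_alt s = wsum (descRuns F M.toNat) 26 := by
    show (let tally := s.toList.foldl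
            (fun (d : PySem.Dict Char Int) ch => d.insert ch (d.getD ch 0 + 1))
            PySem.Dict.empty
          let hm := tally.values.foldl
            (fun (p : PySem.Dict Int Int × Int) f =>
              (p.1.insert f (p.1.getD f 0 + 1), if f > p.2 then f else p.2))
            (PySem.Dict.empty, (0 : Int))
          bloop hm.1 hm.2.toNat 0 26) = _
    simp only []
    rw [PySem.Dict.foldl_insert_getD_add_one_eq_counter, foldl_pair_split]
    simp only [← hF, ← hM]
    rw [PySem.Dict.foldl_insert_getD_add_one_eq_counter,
        bloop_eq (PySem.Dict.counter F) F (fun f => PySem.Dict.getD_counter F f),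
        zero_add]
  rw [hA, hB, sorted_eq_descRuns F M.toNat hb]
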